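-- pv_equiv track=rewrite | github.com/Sea-BirdScientific/seabirdscientific | src/seabirdscientific/instrument_data.py | reverse_hex_bytes
-- ===== SOURCE A (Python) =====
-- def reverse_hex_bytes(bytes_str: str) -> str:
--     """
--     Reverse the ASCII hex byte ordering.
--
--     :param bytes_str: The ASCII hex bytes that need reordering.
--
--     :return: The reordered ASCII hex bytes.
--     """
--     if not bytes_str:
--         raise ValueError("Nothing to reverse")
--
--     if len(bytes_str) % 2 != 0:
--         raise ValueError("Hex string length is not even")
--
--     if len(bytes_str) == 2:
--         return bytes_str
--
--     swapped = ""
--     num_bytes = len(bytes_str) // 2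
--
--     for idx in range(num_bytes - 1, -1, -1):
--         swapped += bytes_str[idx * 2 : idx * 2 + 2]
--
--     return swapped
-- ===== SOURCE B (Python) =====
-- def reverse_hex_bytes(bytes_str: str) -> str:
--     """Reverse the ASCII hex byte ordering (reverse whole string, then re-swap each pair)."""
--     if not bytes_str:
--         raise ValueError("Nothing to reverse")
--
--     if len(bytes_str) % 2 != 0:
--         raise ValueError("Hex string length is not even")
--
--     s = bytes_str[::-1]
--     return "".join(s[i + 1] + s[i] for i in range(0, len(bytes_str), 2))
-- ===== Notes on version B (the rewrite author's own statement) =====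
-- stated objective: idiomatic
-- what changed: Instead of indexing 2-char pairs from the back and concatenating onto a growing string, B reverses the whole string once and then walks it front-to-back swapping the two characters of each pair, joining a generator; the len==2 special case disappears.
import Mathlib
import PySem

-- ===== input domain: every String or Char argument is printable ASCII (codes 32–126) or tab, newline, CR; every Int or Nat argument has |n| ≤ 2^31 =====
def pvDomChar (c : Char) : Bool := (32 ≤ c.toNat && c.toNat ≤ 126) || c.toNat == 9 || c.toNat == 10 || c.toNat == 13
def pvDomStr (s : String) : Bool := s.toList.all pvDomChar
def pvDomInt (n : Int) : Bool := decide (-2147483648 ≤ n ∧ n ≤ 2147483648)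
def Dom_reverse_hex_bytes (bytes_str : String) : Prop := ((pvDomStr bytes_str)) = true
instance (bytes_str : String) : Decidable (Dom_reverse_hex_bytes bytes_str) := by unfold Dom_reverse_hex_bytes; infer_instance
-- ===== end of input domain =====

-- B reverses the whole string once and then swaps the two characters of each pair
-- front-to-back (idiomatic join-of-generator), instead of A's back-to-front pair
-- indexing onto a growing accumulator string with a len==2 special case.


-- ===== PORT A =====
def reverse_hex_bytes (bytes_str : String) : String :=
  -- the two ValueError guards are excluded by Pre_reverse_hex_bytes
  let cs := bytes_str.toList
  if PySem.Str.len bytes_str = 2 then bytes_str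
  else
    let num_bytes : Int := PySem.Int.floordiv (PySem.Str.len bytes_str) 2
    let swapped : List Char :=
      (PySem.List.pyRange (num_bytes - 1) (-1) (-1)).foldl
        (fun acc idx => acc ++ PySem.List.slice cs (some (idx * 2)) (some (idx * 2 + 2))) []
    String.ofList swapped

-- ===== PORT B =====
def reverse_hex_bytes_alt (bytes_str : String) : String :=
  -- guards excluded by Pre_; bytes_str[::-1] is exactly List.reverse of the chars
  let s := bytes_str.toList.reverse
  let out : List Char :=
    (PySem.List.pyRange 0 (PySem.Str.len bytes_str) 2).foldl
      (fun acc i => acc ++ [PySem.List.pyGetD s (i + 1) ' ', PySem.List.pyGetD s i ' ']) []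
  String.ofList out

-- ===== PRECONDITION & SPEC =====
-- Pre_ excludes exactly the inputs where A (and B) raise ValueError: empty or odd-length strings.
def Pre_reverse_hex_bytes (bytes_str : String) : Prop :=
  bytes_str.toList ≠ [] ∧ bytes_str.toList.length % 2 = 0
instance (bytes_str : String) : Decidable (Pre_reverse_hex_bytes bytes_str) := by
  unfold Pre_reverse_hex_bytes; infer_instance
def pvWitness_reverse_hex_bytes : String := "a1b2"

def Spec_reverse_hex_bytes (bytes_str : String) (out : String) : Prop := out = reverse_hex_bytes_alt bytes_str
instance (bytes_str : String) (out : String) : Decidable (Spec_reverse_hex_bytes bytes_str out) := by unfold Spec_reverse_hex_bytes; infer_instance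

-- ===== CLAIM (what is proved, stated in full; the proofs are below) =====
def Claim_equal_reverse_hex_bytes : Prop := ∀ (bytes_str : String), Dom_reverse_hex_bytes bytes_str → Pre_reverse_hex_bytes bytes_str → Spec_reverse_hex_bytes bytes_str (reverse_hex_bytes bytes_str)

-- ===== LEMMAS AND PROOFS =====

-- range(n-1, -1, -1) enumerated
lemma pyRange_down (n : Nat) :
    PySem.List.pyRange ((n : Int) - 1) (-1) (-1) = (List.range n).map (fun k : Nat => (n : Int) - 1 - (k : Int)) := by
  unfold PySem.List.pyRange
  rcases Nat.eq_zero_or_pos n with h | h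
  · subst h; simp
  · have h1 : ¬ ((-1 : Int) = 0) := by omega
    have h2 : ¬ ((0 : Int) < -1) := by omega
    have h3 : (-1 : Int) < (n : Int) - 1 := by omega
    simp only [if_neg h1, if_pos h3, if_neg h2]
    have hq : ((n : Int) - 1 - -1 + - -1 - 1) / - -1 = (n : Int) := by norm_num
    rw [hq, Int.toNat_natCast]
    apply List.map_congr_left
    intro k _
    ring

-- range(0, 2n, 2) enumerated
lemma pyRange_up2 (n : Nat) :
    PySem.List.pyRange 0 (2 * (n : Int)) 2 = (List.range n).map (fun k : Nat => 2 * (k : Int)) := by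
  unfold PySem.List.pyRange
  rcases Nat.eq_zero_or_pos n with h | h
  · subst h; simp
  · have h1 : ¬ ((2 : Int) = 0) := by omega
    have h2 : (0 : Int) < 2 := by omega
    have h3 : (0 : Int) < 2 * (n : Int) := by omega
    simp only [if_neg h1, if_pos h2, if_pos h3]
    have hq : (2 * (n : Int) - 0 + 2 - 1) / 2 = (n : Int) := by omega
    rw [hq, Int.toNat_natCast]
    apply List.map_congr_left
    intro k _
    ring

lemma take_two_drop (cs : List Char) (j : Nat) (h : 2 * j + 2 ≤ cs.length) :
    (cs.drop (2 * j)).take 2 = [cs[2 * j], cs[2 * j + 1]] := by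
  have h1 : 2 * j < cs.length := by omega
  have h2 : 2 * j + 1 < cs.length := by omega
  rw [List.drop_eq_getElem_cons h1, List.drop_eq_getElem_cons h2]
  rfl

-- the per-pair pointwise fact: A's (n-1-k)-th pair equals B's k-th swapped pair of the reversal
lemma pair_eq (cs : List Char) (n k : Nat) (hlen : cs.length = 2 * n) (hk : k < n) :
    PySem.List.slice cs (some (((n : Int) - 1 - k) * 2)) (some (((n : Int) - 1 - k) * 2 + 2))
      = [PySem.List.pyGetD cs.reverse (2 * (k : Int) + 1) ' ',
         PySem.List.pyGetD cs.reverse (2 * (k : Int)) ' '] := by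
  set j : Nat := n - 1 - k with hj
  have hcast : ((n : Int) - 1 - k) = (j : Int) := by omega
  have hcast2 : ((n : Int) - 1 - k) * 2 = ((2 * j : Nat) : Int) := by omega
  have hcast3 : ((n : Int) - 1 - k) * 2 + 2 = ((2 * j : Nat) : Int) + ((2 : Nat) : Int) := by omega
  rw [hcast3, hcast2, PySem.List.slice_natCast_add, take_two_drop cs j (by omega)]
  have hl1 : ((2 * k + 1 : Nat) : Int) < (cs.reverse.length : Int) := by simp [hlen]; omega
  have hl0 : ((2 * k : Nat) : Int) < (cs.reverse.length : Int) := by simp [hlen]; omega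
  have g1 : PySem.List.pyGetD cs.reverse (2 * (k : Int) + 1) ' ' = cs.reverse[(2 * k + 1 : Nat)]'(by exact_mod_cast hl1) := by
    have e : (2 * (k : Int) + 1) = ((2 * k + 1 : Nat) : Int) := by omega
    rw [e, PySem.List.pyGetD_eq_getElem cs.reverse ' ' (by omega) hl1]
    simp only [Int.toNat_natCast]
  have g2 : PySem.List.pyGetD cs.reverse (2 * (k : Int)) ' ' = cs.reverse[(2 * k : Nat)]'(by exact_mod_cast hl0) := by
    have e : (2 * (k : Int)) = ((2 * k : Nat) : Int) := by omega
    rw [e, PySem.List.pyGetD_eq_getElem cs.reverse ' ' (by omega) hl0]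
    simp only [Int.toNat_natCast]
  rw [g1, g2, List.getElem_reverse, List.getElem_reverse]
  have i1 : cs.length - 1 - (2 * k + 1) = 2 * j := by omega
  have i2 : cs.length - 1 - (2 * k) = 2 * j + 1 := by omega
  simp only [i1, i2]
  rfl

-- both foldl-over-range bodies flatten to the same flatMap over range n
lemma core_eq (cs : List Char) (n : Nat) (hlen : cs.length = 2 * n) :
    (PySem.List.pyRange ((n : Int) - 1) (-1) (-1)).foldl
        (fun acc idx => acc ++ PySem.List.slice cs (some (idx * 2)) (some (idx * 2 + 2))) []
      = (PySem.List.pyRange 0 (2 * (n : Int)) 2).foldl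
        (fun acc i => acc ++ [PySem.List.pyGetD cs.reverse (i + 1) ' ',
                              PySem.List.pyGetD cs.reverse i ' ']) [] := by
  rw [pyRange_down, pyRange_up2,
      PySem.List.foldl_append_eq_flatMap, PySem.List.foldl_append_eq_flatMap,
      List.flatMap_map, List.flatMap_map]
  simp only [List.nil_append]
  apply List.flatMap_congr
  intro k hk
  have hk' : k < n := List.mem_range.mp hk
  exact pair_eq cs n k hlen hk'

-- ===== VERDICT (by name: the statement is the Claim_ definition above) =====
theorem reverse_hex_bytes_spec : Claim_equal_reverse_hex_bytes := by
  intro s _ hpre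
  obtain ⟨hne, heven⟩ := hpre
  unfold Spec_reverse_hex_bytes reverse_hex_bytes reverse_hex_bytes_alt
  obtain ⟨n, hn⟩ : ∃ n, s.toList.length = 2 * n := ⟨s.toList.length / 2, by omega⟩
  have hlen : PySem.Str.len s = 2 * (n : Int) := by
    rw [PySem.Str.len_eq, hn]; push_cast; ring
  by_cases h2 : PySem.Str.len s = 2
  · -- A returns the string unchanged; B's single swapped pair reproduces it
    rw [if_pos h2]
    have hn1 : n = 1 := by omega
    subst hn1
    have hcs : s.toList.length = 2 := by omega
    obtain ⟨a, b, habl⟩ : ∃ a b, s.toList = [a, b] := by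
      match hl : s.toList, hcs' : hcs with
      | [a, b], _ => exact ⟨a, b, rfl⟩
    rw [hlen, habl]
    have hr : PySem.List.pyRange 0 (2 * ((1 : Nat) : Int)) 2 = [0] := by decide
    rw [hr]
    simp [PySem.List.pyGetD]
    have hs : s = String.ofList [a, b] := by rw [← habl, String.ofList_toList]
    conv_lhs => rw [hs]
  · rw [if_neg h2]
    simp only [hlen]
    have hfd2 : PySem.Int.floordiv (2 * (n : Int)) 2 - 1 = (n : Int) - 1 := by
      rw [PySem.Int.floordiv_eq_ediv_of_pos (by omega)]; omega
    rw [hfd2, core_eq s.toList n hn]
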